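-- pv_equiv track=rewrite | github.com/nonette/euler | p/p060.py | splitsum
-- ===== SOURCE A (Python) =====
-- def splitsum(n, target, searchspace, acc=[]):
--     if n == 1:
--         if target in searchspace:
--             yield acc + [target]
--     for i,p in enumerate(searchspace):
--         if p > target:
--             break
--         for v in splitsum(n-1, target-p, searchspace[i+1:], acc+[p]):
--             yield v
-- ===== SOURCE B (Python) =====
-- def splitsum(n, target, searchspace, acc=[]):
--     # iterative explicit-stack DFS; start index instead of slicing
--     stack = [(n, target, 0, acc)]
--     while stack:
--         m, t, s, a = stack.pop()
--         if m == 1 and t in searchspace[s:]: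
--             yield a + [t]
--         children = []
--         for i in range(s, len(searchspace)):
--             p = searchspace[i]
--             if p > t:
--                 break
--             children.append((m - 1, t - p, i + 1, a + [p]))
--         stack.extend(reversed(children))
-- ===== Notes on version B (the rewrite author's own statement) =====
-- stated objective: alternative
-- what changed: The recursive generator (which slices the search space at every call) is replaced by an iterative explicit-stack DFS over frames (n, target, start_index, acc), pushing children in reverse so pop order preserves the original yield order.
import Mathlib
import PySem

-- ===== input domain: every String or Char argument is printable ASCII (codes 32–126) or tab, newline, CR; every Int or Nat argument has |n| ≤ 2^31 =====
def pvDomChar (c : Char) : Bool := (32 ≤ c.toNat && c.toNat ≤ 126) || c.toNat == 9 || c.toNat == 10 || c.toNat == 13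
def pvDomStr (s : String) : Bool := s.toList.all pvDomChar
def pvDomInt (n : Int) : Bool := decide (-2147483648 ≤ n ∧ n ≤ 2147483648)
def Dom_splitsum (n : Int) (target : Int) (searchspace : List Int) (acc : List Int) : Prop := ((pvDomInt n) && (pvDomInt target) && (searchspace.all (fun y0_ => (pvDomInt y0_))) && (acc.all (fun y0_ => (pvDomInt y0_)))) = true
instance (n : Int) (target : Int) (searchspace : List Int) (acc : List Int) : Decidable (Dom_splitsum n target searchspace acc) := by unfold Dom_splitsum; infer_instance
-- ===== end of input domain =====

-- B replaces A's recursive generator by an explicit-stack DFS with a start index; same return value (the generators are compared as the lists they yield).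

-- ===== PORT A =====
-- A is a recursive generator: base yield (n == 1 and membership), then the
-- enumerate loop with break, recursing on the slice searchspace[i+1:].
mutual
def splitsum (n : Int) (target : Int) (searchspace : List Int) (acc : List Int) : List (List Int) :=
  (if n = 1 ∧ target ∈ searchspace then [acc ++ [target]] else []) ++
  splitsumFor n target searchspace acc
termination_by (searchspace.length, 1)

-- the 'for i,p in enumerate(searchspace)' loop; searchspace[i+1:] is the tail of the current suffix
def splitsumFor (n : Int) (target : Int) (searchspace : List Int) (acc : List Int) : List (List Int) :=
  match searchspace with
  | [] => []
  | p :: rest =>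
    if p > target then []
    else splitsum (n - 1) (target - p) rest (acc ++ [p]) ++ splitsumFor n target rest acc
termination_by (searchspace.length, 0)
end

-- ===== PORT B =====
-- the inner 'for i in range(s, len(searchspace))' collection loop of Source B,
-- iterating the suffix searchspace[s:] while carrying the index i
def altChildren (m t : Int) (a : List Int) : Nat → List Int → List (Int × Int × Nat × List Int)
  | _, [] => []
  | i, p :: rest =>
    if p > t then []
    else (m - 1, t - p, i + 1, a ++ [p]) :: altChildren m t a (i + 1) rest

-- weight of a frame, used only for termination of the while loop
def altWeight (L : Nat) (f : Int × Int × Nat × List Int) : Nat := 2 ^ (L - f.2.2.1)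

theorem altChildren_weight (t : Int) (L : Nat) (m : Int) (a : List Int) :
    ∀ (xs : List Int) (i : Nat), xs.length = L - i →
      ((altChildren m t a i xs).map (altWeight L)).sum + 1 ≤ 2 ^ (L - i) := by
  intro xs
  induction xs with
  | nil => intro i h; simp [altChildren]; exact Nat.one_le_two_pow
  | cons p rest ih =>
    intro i h
    simp only [altChildren]
    split
    · simp; exact Nat.one_le_two_pow
    · have hi : i < L := by
        by_contra hc
        simp only [List.length_cons] at h
        omega
      have hLi : L - i = (L - (i + 1)) + 1 := by omega
      have hrest := ih (i + 1) (by simp only [List.length_cons] at h; omega)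
      simp only [List.map_cons, List.sum_cons, altWeight]
      rw [hLi, pow_succ]
      omega

-- the 'while stack:' loop of Source B; the list is the stack top-first
-- (stack.extend(reversed(children)) followed by pops = children in order)
def altGo (ss : List Int) : List (Int × Int × Nat × List Int) → List (List Int)
  | [] => []
  | (m, t, s, a) :: stk =>
    (if m = 1 ∧ t ∈ ss.drop s then [a ++ [t]] else []) ++
    altGo ss (altChildren m t a s (ss.drop s) ++ stk)
termination_by stk => (stk.map (altWeight ss.length)).sum
decreasing_by
  simp only [List.map_append, List.sum_append, List.map_cons, List.sum_cons]
  have := altChildren_weight t ss.length m a (ss.drop s) s (by simp)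
  simp only [altWeight]
  omega

def splitsum_alt (n : Int) (target : Int) (searchspace : List Int) (acc : List Int) : List (List Int) :=
  altGo searchspace [(n, target, 0, acc)]

-- ===== PRECONDITION & SPEC =====
def Spec_splitsum (n : Int) (target : Int) (searchspace : List Int) (acc : List Int) (out : List (List Int)) : Prop := out = splitsum_alt n target searchspace acc
instance (n : Int) (target : Int) (searchspace : List Int) (acc : List Int) (out : List (List Int)) : Decidable (Spec_splitsum n target searchspace acc out) := by unfold Spec_splitsum; infer_instance

-- ===== CLAIM (what is proved, stated in full; the proofs are below) =====
def Claim_equal_splitsum : Prop := ∀ (n : Int) (target : Int) (searchspace : List Int) (acc : List Int), Dom_splitsum n target searchspace acc → Spec_splitsum n target searchspace acc (splitsum n target searchspace acc)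

-- ===== LEMMAS AND PROOFS =====

-- the children frames of a suffix, interpreted through A, are exactly A's loop body
theorem altChildren_spec (ss : List Int) (m t : Int) (a : List Int) :
    ∀ (xs : List Int) (i : Nat), ss.drop i = xs →
      ((altChildren m t a i xs).map
        (fun f => splitsum f.1 f.2.1 (ss.drop f.2.2.1) f.2.2.2)).flatten
      = splitsumFor m t xs a := by
  intro xs
  induction xs with
  | nil => intro i _; simp [altChildren, splitsumFor]
  | cons p rest ih =>
    intro i hdrop
    have hrest : ss.drop (i + 1) = rest := by
      have : ss.drop (i + 1) = (ss.drop i).drop 1 := by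
        rw [List.drop_drop]
      rw [this, hdrop]; rfl
    simp only [altChildren, splitsumFor]
    split
    · simp
    · simp only [List.map_cons, List.flatten_cons, hrest, ih (i + 1) hrest]

-- loop invariant: the stack loop emits each frame's whole subtree (A's output) in order
theorem altGo_spec (ss : List Int) :
    ∀ (stk : List (Int × Int × Nat × List Int)),
      altGo ss stk
      = (stk.map (fun f => splitsum f.1 f.2.1 (ss.drop f.2.2.1) f.2.2.2)).flatten := by
  intro stk
  fun_induction altGo ss stk with
  | case1 => simp
  | case2 m t s a stk ih =>
    rw [ih]
    simp only [List.map_append, List.flatten_append, List.map_cons, List.flatten_cons]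
    rw [← List.append_assoc, altChildren_spec ss m t a (ss.drop s) s rfl]
    conv_rhs => rw [splitsum]

-- ===== VERDICT (by name: the statement is the Claim_ definition above) =====
theorem splitsum_spec : Claim_equal_splitsum := by
  intro n target ss acc _
  unfold Spec_splitsum splitsum_alt
  rw [altGo_spec]
  simp
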